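-- pv_equiv track=rewrite | github.com/LakshmiVinoj/Hangman- | hangman.py | letter_update
-- ===== SOURCE A (Python) =====
-- def letter_update(secret,dashes,guess):
--     if secret=="":
--         return ""
--     if secret[0]==dashes[0]:
--         return secret[0] + letter_update(secret[1:],dashes[1:],guess)
--     elif guess==secret[0]:
--         return guess + letter_update(secret[1:],dashes[1:],guess)
--     else:
--         return "-" + letter_update(secret[1:],dashes[1:],guess)
-- ===== SOURCE B (Python) =====
-- def letter_update(secret, dashes, guess):
--     out = []
--     for i in range(len(secret)):
--         c = secret[i]
--         if c == dashes[i]: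
--             out.append(c)
--         elif guess == c:
--             out.append(guess)
--         else:
--             out.append("-")
--     return "".join(out)
-- ===== Notes on version B (the rewrite author's own statement) =====
-- stated objective: faster
-- what changed: Replaced A's recursion with repeated string slicing/concatenation by a single indexed for-loop that accumulates one-character pieces in a list and joins them once.
import Mathlib
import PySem

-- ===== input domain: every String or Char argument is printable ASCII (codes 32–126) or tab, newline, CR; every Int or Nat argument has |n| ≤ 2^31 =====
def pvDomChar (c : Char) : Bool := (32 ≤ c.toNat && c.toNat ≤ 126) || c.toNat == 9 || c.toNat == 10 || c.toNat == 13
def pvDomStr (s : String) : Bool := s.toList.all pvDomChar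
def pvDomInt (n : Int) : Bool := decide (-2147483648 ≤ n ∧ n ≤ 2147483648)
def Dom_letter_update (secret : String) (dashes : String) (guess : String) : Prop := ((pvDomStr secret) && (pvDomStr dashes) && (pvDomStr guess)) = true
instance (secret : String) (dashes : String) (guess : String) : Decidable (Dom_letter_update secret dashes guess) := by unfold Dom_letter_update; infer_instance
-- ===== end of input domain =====

-- B replaces A's recursion (with repeated string concatenation) by one indexed loop that
-- collects one-character pieces in a list and joins them once; same branch order and values.

-- ===== PORT A =====
-- literal transliteration of A's recursion over the two strings
def luA : List Char → List Char → String → String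
  | [], _, _ => ""
  | _ :: _, [], _ => ""   -- Python raises IndexError (dashes[0]) here; excluded by Pre_
  | s :: ss, d :: ds, g =>
    if s == d then String.mk [s] ++ luA ss ds g
    else if g == String.mk [s] then g ++ luA ss ds g
    else "-" ++ luA ss ds g

def letter_update (secret : String) (dashes : String) (guess : String) : String :=
  luA secret.toList dashes.toList guess

-- ===== PORT B =====
-- one piece of the output per loop step (empty list marks Python's IndexError case)
def luBstep (s d : List Char) (guess : String) (i : Nat) : List String :=
  match s[i]?, d[i]? with
  | some sc, some dc =>
    [if sc == dc then String.mk [sc] else if guess == String.mk [sc] then guess else "-"]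
  | _, _ => []   -- dashes[i] raises IndexError in Python; excluded by Pre_

def letter_update_alt (secret : String) (dashes : String) (guess : String) : String :=
  let s := secret.toList
  let d := dashes.toList
  let out := (List.range s.length).foldl (fun acc i => acc ++ luBstep s d guess i) ([] : List String)
  String.join out

-- ===== PRECONDITION & SPEC =====
-- Pre_ excludes exactly the inputs where A raises IndexError (dashes shorter than secret).
def Pre_letter_update (secret : String) (dashes : String) (guess : String) : Prop :=
  secret.length ≤ dashes.length
instance (secret : String) (dashes : String) (guess : String) : Decidable (Pre_letter_update secret dashes guess) := by unfold Pre_letter_update; infer_instance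

def pvWitness_letter_update : String × String × String := ("cat", "c--", "a")

def Spec_letter_update (secret : String) (dashes : String) (guess : String) (out : String) : Prop := out = letter_update_alt secret dashes guess
instance (secret : String) (dashes : String) (guess : String) (out : String) : Decidable (Spec_letter_update secret dashes guess out) := by unfold Spec_letter_update; infer_instance

-- ===== CLAIM (what is proved, stated in full; the proofs are below) =====
def Claim_equal_letter_update : Prop := ∀ (secret : String) (dashes : String) (guess : String), Dom_letter_update secret dashes guess → Pre_letter_update secret dashes guess → Spec_letter_update secret dashes guess (letter_update secret dashes guess)

-- ===== LEMMAS AND PROOFS =====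

theorem str_foldl : ∀ (l : List String) (s : String),
    List.foldl (fun r t => r ++ t) s l = s ++ List.foldl (fun r t => r ++ t) "" l := by
  intro l
  induction l with
  | nil => intro s; simp
  | cons x xs ih =>
    intro s
    simp only [List.foldl_cons]
    rw [ih (s ++ x), ih ("" ++ x)]
    simp [String.append_assoc]

theorem join_cons (s : String) (l : List String) : String.join (s :: l) = s ++ String.join l := by
  simp only [String.join, List.foldl_cons]
  rw [str_foldl l ("" ++ s)]
  simp

theorem foldl_acc (f : Nat → List String) :
    ∀ (l : List Nat) (a : List String),
      l.foldl (fun acc i => acc ++ f i) a = a ++ l.foldl (fun acc i => acc ++ f i) [] := by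
  intro l
  induction l with
  | nil => simp
  | cons x xs ih =>
    intro a
    simp only [List.foldl_cons]
    rw [ih (a ++ f x), ih ([] ++ f x)]
    simp [List.append_assoc]

theorem main_lemma (g : String) :
    ∀ (ss ds : List Char), ss.length ≤ ds.length →
      String.join ((List.range ss.length).foldl (fun acc i => acc ++ luBstep ss ds g i) []) =
        luA ss ds g := by
  intro ss
  induction ss with
  | nil => intro ds _; simp [luA, String.join]
  | cons sc ss ih =>
    intro ds hlen
    cases ds with
    | nil => simp at hlen
    | cons dc ds =>
      have hshift : ∀ (acc : List String) (i : Nat),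
          acc ++ luBstep (sc :: ss) (dc :: ds) g (i + 1) = acc ++ luBstep ss ds g i := by
        intro acc i; simp [luBstep]
      simp only [List.length_cons]
      rw [List.range_succ_eq_map, List.foldl_cons, List.foldl_map]
      simp only [hshift]
      have h0 : ([] : List String) ++ luBstep (sc :: ss) (dc :: ds) g 0 =
          [if sc == dc then String.mk [sc] else if g == String.mk [sc] then g else "-"] := by
        simp [luBstep]
      rw [h0, foldl_acc, List.singleton_append, join_cons,
        ih ds (by simpa using Nat.le_of_succ_le_succ (by simpa using hlen))]
      by_cases h1 : sc == dc
      · simp [luA, h1]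
      · by_cases h2 : g == String.mk [sc] <;> simp [luA, h1, h2]

-- ===== VERDICT (by name: the statement is the Claim_ definition above) =====
theorem letter_update_spec : Claim_equal_letter_update := by
  intro secret dashes guess _ hpre
  unfold Spec_letter_update letter_update letter_update_alt
  have : secret.toList.length ≤ dashes.toList.length := by
    simpa [String.length_toList] using hpre
  exact (main_lemma guess secret.toList dashes.toList this).symm
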